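-- pv_equiv track=rewrite | github.com/RandomCodeSpace/codecontext | src/codecontext/web.py | _path_suffix_match
-- ===== SOURCE A (Python) =====
-- def _path_suffix_match(file_path: str, import_path: str) -> bool:
-- 	value = import_path
-- 	while value.startswith(".") or value.startswith("/"):
-- 		value = value[1:]
-- 	if not value:
-- 		return False
-- 	suffixes = [value, f"{value}.go", f"{value}.py", f"{value}.js", f"{value}.ts", f"{value}.java"]
-- 	return any(file_path.endswith(sfx) for sfx in suffixes)
-- ===== SOURCE B (Python) =====
-- def _path_suffix_match(file_path: str, import_path: str) -> bool:
--     value = import_path.lstrip("./")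
--     if not value:
--         return False
--     if file_path.endswith(value):
--         return True
--     base, dot, ext = file_path.rpartition(".")
--     return dot == "." and ("." + ext) in {".go", ".py", ".js", ".ts", ".java"} and base.endswith(value)
-- ===== Notes on version B (the rewrite author's own statement) =====
-- stated objective: alternative
-- what changed: Instead of enumerating the 6 candidate suffixes value+ext and scanning file_path once per candidate, B checks the bare value first and otherwise splits file_path at its last dot once (rpartition) and tests the extension against a set and the base against value.
import Mathlib
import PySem

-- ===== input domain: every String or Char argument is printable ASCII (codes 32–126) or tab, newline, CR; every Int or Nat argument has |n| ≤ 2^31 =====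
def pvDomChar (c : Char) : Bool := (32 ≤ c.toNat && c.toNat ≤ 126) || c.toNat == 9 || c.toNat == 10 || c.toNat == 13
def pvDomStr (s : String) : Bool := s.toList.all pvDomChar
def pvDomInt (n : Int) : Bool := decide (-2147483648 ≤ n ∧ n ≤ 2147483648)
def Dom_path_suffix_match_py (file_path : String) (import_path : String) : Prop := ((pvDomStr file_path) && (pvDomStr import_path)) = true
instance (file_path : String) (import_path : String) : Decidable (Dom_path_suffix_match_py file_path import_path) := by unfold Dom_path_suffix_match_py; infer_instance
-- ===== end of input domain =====

-- B replaces A's 6-candidate suffix enumeration by one rpartition at the last dot plus a set-membership test on the extension (alternative decomposition, same cost class).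

-- ===== PORT A =====
-- the while loop 'value = value[1:] while it startswith "." or "/"', as structural recursion on the code points
def pvStripA : List Char → List Char
  | [] => []
  | c :: rest => if c = '.' || c = '/' then pvStripA rest else c :: rest

def path_suffix_match_py (file_path : String) (import_path : String) : Bool :=
  let value := String.ofList (pvStripA import_path.toList)
  if value = "" then false
  else
    let suffixes := [value, value ++ ".go", value ++ ".py", value ++ ".js", value ++ ".ts", value ++ ".java"]
    suffixes.any (fun sfx => PySem.Str.endswith file_path sfx)

-- ===== PORT B =====
def path_suffix_match_py_alt (file_path : String) (import_path : String) : Bool :=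
  let value := import_path.toList.dropWhile (fun c => c = '.' || c = '/')   -- lstrip("./")
  if value.isEmpty then false
  else if PySem.Chars.endswith file_path.toList value then true
  else
    -- hand port of file_path.rpartition('.'), exact: split at the LAST '.' via the reversed list
    let r := file_path.toList.reverse
    let extRev := r.takeWhile (fun c => c ≠ '.')
    if extRev.length < r.length then   -- a dot exists (dot == ".")
      (decide (extRev = ['o','g'] ∨ extRev = ['y','p'] ∨ extRev = ['s','j'] ∨ extRev = ['s','t'] ∨ extRev = ['a','v','a','j']))
        && PySem.Chars.endswith ((r.drop (extRev.length + 1)).reverse) value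
    else false

-- ===== PRECONDITION & SPEC =====
def Spec_path_suffix_match_py (file_path : String) (import_path : String) (out : Bool) : Prop := out = path_suffix_match_py_alt file_path import_path
instance (file_path : String) (import_path : String) (out : Bool) : Decidable (Spec_path_suffix_match_py file_path import_path out) := by unfold Spec_path_suffix_match_py; infer_instance

-- ===== CLAIM (what is proved, stated in full; the proofs are below) =====
def Claim_equal_path_suffix_match_py : Prop := ∀ (file_path : String) (import_path : String), Dom_path_suffix_match_py file_path import_path → Spec_path_suffix_match_py file_path import_path (path_suffix_match_py file_path import_path)

-- ===== LEMMAS AND PROOFS =====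

theorem pvStripA_eq_dropWhile (l : List Char) :
    pvStripA l = l.dropWhile (fun c => c = '.' || c = '/') := by
  induction l with
  | nil => rfl
  | cons c rest ih =>
    simp only [pvStripA, List.dropWhile_cons]
    by_cases h : (c = '.' || c = '/') = true
    · simp [h, ih]
    · simp [h]

theorem pv_dw_eq_drop {α : Type} (p : α → Bool) (l : List α) :
    l.dropWhile p = l.drop (l.takeWhile p).length := by
  induction l with
  | nil => rfl
  | cons c rest ih =>
    by_cases h : p c = true
    · simp [h, ih]
    · simp [h]

-- the core characterisation: for a dot-free extension e, l ends with v ++ '.' :: e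
-- iff the reversed list's dot-free head is exactly e.reverse and the rest (the base) ends with v
theorem pv_key (l v e : List Char) (he : '.' ∉ e) :
    ((v ++ '.' :: e) <:+ l) ↔
      (l.reverse.takeWhile (fun c => c ≠ '.') = e.reverse ∧
       e.length < l.length ∧
       v.reverse <+: l.reverse.drop (e.length + 1)) := by
  rw [← List.reverse_prefix]
  have hrev : (v ++ '.' :: e).reverse = e.reverse ++ '.' :: v.reverse := by simp
  rw [hrev]
  have hallp : (List.takeWhile (fun c => decide (c ≠ '.')) e.reverse) = e.reverse := by
    rw [List.takeWhile_eq_self_iff.mpr]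
    intro c hc
    simp only [List.mem_reverse] at hc
    simp only [decide_eq_true_eq]
    intro h; exact he (h ▸ hc)
  constructor
  · rintro ⟨t, ht⟩
    have hr : l.reverse = e.reverse ++ '.' :: (v.reverse ++ t) := by
      rw [← ht]; simp
    have htw : l.reverse.takeWhile (fun c => c ≠ '.') = e.reverse := by
      rw [hr, List.takeWhile_append, if_pos (by rw [hallp])]
      simp
    refine ⟨htw, ?_, ?_⟩
    · have h2 := congrArg List.length hr
      simp at h2
      omega
    · have hd : l.reverse.drop (e.length + 1) = v.reverse ++ t := by
        have : l.reverse = (e.reverse ++ ['.']) ++ (v.reverse ++ t) := by rw [hr]; simp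
        rw [this]
        have hlen : (e.reverse ++ ['.']).length = e.length + 1 := by simp
        rw [← hlen, List.drop_left]
      exact hd ▸ ⟨t, rfl⟩
  · rintro ⟨htw, hlen, hpre⟩
    have hdw := pv_dw_eq_drop (fun c => decide (c ≠ '.')) l.reverse
    rw [htw] at hdw
    have hlr : l.reverse.length = l.length := by simp
    have hne : l.reverse.dropWhile (fun c => decide (c ≠ '.')) ≠ [] := by
      intro h
      rw [h] at hdw
      have := congrArg List.length hdw
      have herl : e.reverse.length = e.length := by simp
      simp only [List.length_nil, List.length_drop, List.length_reverse] at this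
      omega
    have hhead := List.head_dropWhile_not (fun c => decide (c ≠ '.')) hne
    have hcons : l.reverse.dropWhile (fun c => decide (c ≠ '.')) = '.' :: l.reverse.drop (e.length + 1) := by
      obtain ⟨c, rest, hcr⟩ := List.exists_cons_of_ne_nil hne
      have hc : c = '.' := by
        have hch : (List.dropWhile (fun c => decide (c ≠ '.')) l.reverse).head hne = c := by
          simp only [hcr, List.head_cons]
        rw [hch] at hhead; simpa using hhead
      rw [hcr, hc]
      congr 1
      have : rest = (l.reverse.dropWhile (fun c => decide (c ≠ '.'))).drop 1 := by rw [hcr]; rfl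
      rw [this, hdw, List.drop_drop]
      congr 1
      rw [List.length_reverse]
    have hr : l.reverse = e.reverse ++ '.' :: l.reverse.drop (e.length + 1) := by
      conv_lhs => rw [← List.takeWhile_append_dropWhile (p := fun c => decide (c ≠ '.')) (l := l.reverse)]
      rw [htw, hcons]
    obtain ⟨t, ht⟩ := hpre
    exact ⟨t, by rw [hr, ← ht]; simp⟩

-- the five extension candidates of A equal B's rpartition branch
theorem pv_main (l v : List Char) :
    (PySem.Chars.endswith l (v ++ ['.','g','o']) ||
     (PySem.Chars.endswith l (v ++ ['.','p','y']) ||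
      (PySem.Chars.endswith l (v ++ ['.','j','s']) ||
       (PySem.Chars.endswith l (v ++ ['.','t','s']) ||
        PySem.Chars.endswith l (v ++ ['.','j','a','v','a']))))) =
    (if (l.reverse.takeWhile (fun c => c ≠ '.')).length < l.reverse.length then
       (decide ((l.reverse.takeWhile (fun c => c ≠ '.')) = ['o','g'] ∨
                (l.reverse.takeWhile (fun c => c ≠ '.')) = ['y','p'] ∨
                (l.reverse.takeWhile (fun c => c ≠ '.')) = ['s','j'] ∨
                (l.reverse.takeWhile (fun c => c ≠ '.')) = ['s','t'] ∨
                (l.reverse.takeWhile (fun c => c ≠ '.')) = ['a','v','a','j']))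
         && PySem.Chars.endswith ((l.reverse.drop ((l.reverse.takeWhile (fun c => c ≠ '.')).length + 1)).reverse) v
     else false) := by
  rw [Bool.eq_iff_iff]
  simp only [Bool.or_eq_true, PySem.Chars.endswith_iff]
  rw [pv_key l v ['g','o'] (by decide), pv_key l v ['p','y'] (by decide),
      pv_key l v ['j','s'] (by decide), pv_key l v ['t','s'] (by decide),
      pv_key l v ['j','a','v','a'] (by decide)]
  have hsuf : ∀ k : Nat, (v <:+ (l.reverse.drop k).reverse) ↔ v.reverse <+: l.reverse.drop k := by
    intro k; rw [← List.reverse_prefix, List.reverse_reverse]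
  have hlr : l.reverse.length = l.length := by simp
  by_cases hif : (l.reverse.takeWhile (fun c => c ≠ '.')).length < l.reverse.length
  · rw [if_pos hif]
    simp only [Bool.and_eq_true, decide_eq_true_eq, PySem.Chars.endswith_iff, hsuf,
      List.reverse_cons, List.reverse_nil, List.nil_append, List.cons_append, List.length_cons,
      List.length_nil]
    generalize List.takeWhile (fun c => decide (c ≠ '.')) l.reverse = t at hif ⊢
    constructor
    · rintro (⟨h1, h2, h3⟩ | ⟨h1, h2, h3⟩ | ⟨h1, h2, h3⟩ | ⟨h1, h2, h3⟩ | ⟨h1, h2, h3⟩) <;>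
        subst h1 <;>
        exact ⟨by tauto, by simpa using h3⟩
    · rintro ⟨(h1 | h1 | h1 | h1 | h1), hp⟩ <;> subst h1 <;>
        simp only [List.length_cons, List.length_nil] at hp hif
      · exact Or.inl ⟨rfl, by omega, by simpa using hp⟩
      · exact Or.inr (Or.inl ⟨rfl, by omega, by simpa using hp⟩)
      · exact Or.inr (Or.inr (Or.inl ⟨rfl, by omega, by simpa using hp⟩))
      · exact Or.inr (Or.inr (Or.inr (Or.inl ⟨rfl, by omega, by simpa using hp⟩)))
      · exact Or.inr (Or.inr (Or.inr (Or.inr ⟨rfl, by omega, by simpa using hp⟩)))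
  · rw [if_neg hif]
    simp only [Bool.false_eq_true, iff_false]
    generalize List.takeWhile (fun c => decide (c ≠ '.')) l.reverse = t at hif
    rintro (⟨h1, h2, _⟩ | ⟨h1, h2, _⟩ | ⟨h1, h2, _⟩ | ⟨h1, h2, _⟩ | ⟨h1, h2, _⟩) <;>
      subst h1 <;> simp only [List.length_cons, List.length_nil, List.length_reverse] at hif <;>
      simp only [List.length_cons, List.length_nil] at h2 <;> omega

-- ===== VERDICT (by name: the statement is the Claim_ definition above) =====
theorem path_suffix_match_py_spec : Claim_equal_path_suffix_match_py := by
  intro fp ip _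
  unfold Spec_path_suffix_match_py
  unfold path_suffix_match_py path_suffix_match_py_alt
  rw [pvStripA_eq_dropWhile]
  cases hv : ip.toList.dropWhile (fun c => c = '.' || c = '/') with
  | nil => simp
  | cons c rest =>
    have hne : String.ofList (c :: rest) ≠ "" := by simp
    simp only [List.isEmpty_cons, if_neg hne, Bool.false_eq_true, if_false]
    simp only [List.any_cons, List.any_nil, Bool.or_false, PySem.Str.endswith_eq]
    have htl : ∀ s : String, (String.ofList (c :: rest) ++ s).toList = (c :: rest) ++ s.toList := by
      intro s; simp
    have h0 : (String.ofList (c :: rest)).toList = c :: rest := by simp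
    have hgo : (".go" : String).toList = ['.', 'g', 'o'] := rfl
    have hpy : (".py" : String).toList = ['.', 'p', 'y'] := rfl
    have hjs : (".js" : String).toList = ['.', 'j', 's'] := rfl
    have hts : (".ts" : String).toList = ['.', 't', 's'] := rfl
    have hja : (".java" : String).toList = ['.', 'j', 'a', 'v', 'a'] := rfl
    rw [h0, htl, htl, htl, htl, htl, hgo, hpy, hjs, hts, hja]
    cases h1 : PySem.Chars.endswith fp.toList (c :: rest) with
    | true => simp [h1]
    | false =>
      simp only [h1, Bool.false_or, Bool.false_eq_true, if_false]
      exact pv_main fp.toList (c :: rest)
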